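-- pv_equiv track=rewrite | github.com/ghantasala-sr/Argus---Event-Driven-Agent-Architecture | agents/summary/agent.py | _rank_findings
-- ===== SOURCE A (Python) =====
-- from typing import Any
--
-- def _rank_findings(findings: list[dict[str, Any]]) -> dict[str, list[dict[str, Any]]]:
--     """Group and rank findings by severity."""
--     ranked: dict[str, list[dict[str, Any]]] = {
--         "critical": [],
--         "warning": [],
--         "info": [],
--     }
--
--     for f in findings:
--         sev = f.get("severity", "info").lower()
--         if sev in ranked:
--             ranked[sev].append(f)
--         else:
--             ranked["info"].append(f)
--
--     return ranked
-- ===== SOURCE B (Python) =====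
-- from typing import Any
--
-- def _rank_findings(findings: list[dict[str, Any]]) -> dict[str, list[dict[str, Any]]]:
--     """Group and rank findings by severity (three independent filtering passes)."""
--     return {
--         "critical": [f for f in findings if f.get("severity", "info").lower() == "critical"],
--         "warning": [f for f in findings if f.get("severity", "info").lower() == "warning"],
--         "info": [f for f in findings
--                  if f.get("severity", "info").lower() not in ("critical", "warning")],
--     }
-- ===== Notes on version B (the rewrite author's own statement) =====
-- stated objective: alternative
-- what changed: Replaced the single mutating distribution loop over a pre-built dict with a dict literal built from three independent filtering comprehensions (critical/warning by equality, info by exclusion).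
import Mathlib
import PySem

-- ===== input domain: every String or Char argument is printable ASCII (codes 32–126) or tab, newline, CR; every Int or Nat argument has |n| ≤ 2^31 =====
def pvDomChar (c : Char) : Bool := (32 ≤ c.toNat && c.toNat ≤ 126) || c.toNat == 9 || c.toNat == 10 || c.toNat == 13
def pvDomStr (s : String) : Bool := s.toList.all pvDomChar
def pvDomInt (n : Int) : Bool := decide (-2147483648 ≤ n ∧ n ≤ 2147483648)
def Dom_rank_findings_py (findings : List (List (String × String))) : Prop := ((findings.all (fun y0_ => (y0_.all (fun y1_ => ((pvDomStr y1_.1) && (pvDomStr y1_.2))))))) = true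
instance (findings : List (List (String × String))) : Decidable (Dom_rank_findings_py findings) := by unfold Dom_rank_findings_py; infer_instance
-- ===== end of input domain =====

-- B differs from A by decomposition: one dict literal of three independent filter passes instead of a mutating distribution loop.

-- shared helper: f.get("severity", "info").lower() (first-match lookup on the assoc list)
def pvSev (f : List (String × String)) : String :=
  PySem.Str.lower ((PySem.Dict.mk f).getD "severity" "info")

-- ===== PORT A =====
-- loop body of A: one iteration of 'for f in findings'
def pvStepA (ranked : PySem.Dict String (List (List (String × String))))
    (f : List (String × String)) : PySem.Dict String (List (List (String × String))) :=
  let sev := pvSev f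
  if ranked.contains sev then
    ranked.modify sev [] (· ++ [f])
  else
    ranked.modify "info" [] (· ++ [f])

def rank_findings_py (findings : List (List (String × String))) : List (String × List (List (String × String))) :=
  (findings.foldl pvStepA
    (PySem.Dict.ofList [("critical", []), ("warning", []), ("info", [])])).items

-- ===== PORT B =====
def rank_findings_py_alt (findings : List (List (String × String))) : List (String × List (List (String × String))) :=
  [("critical", findings.filter (fun f => pvSev f == "critical")),
   ("warning",  findings.filter (fun f => pvSev f == "warning")),
   ("info",     findings.filter (fun f => pvSev f != "critical" && pvSev f != "warning"))]

-- ===== PRECONDITION & SPEC =====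
def Spec_rank_findings_py (findings : List (List (String × String))) (out : List (String × List (List (String × String)))) : Prop := out = rank_findings_py_alt findings
instance (findings : List (List (String × String))) (out : List (String × List (List (String × String)))) : Decidable (Spec_rank_findings_py findings out) := by unfold Spec_rank_findings_py; infer_instance

-- ===== CLAIM (what is proved, stated in full; the proofs are below) =====
def Claim_equal_rank_findings_py : Prop := ∀ (findings : List (List (String × String))), Dom_rank_findings_py findings → Spec_rank_findings_py findings (rank_findings_py findings)

-- ===== LEMMAS AND PROOFS =====

-- loop invariant: the fold over any literal three-bucket dict appends the three filters
theorem rank_loop_invariant (l : List (List (String × String)))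
    (c w i : List (List (String × String))) :
    l.foldl pvStepA (PySem.Dict.mk [("critical", c), ("warning", w), ("info", i)])
    = PySem.Dict.mk
        [("critical", c ++ l.filter (fun f => pvSev f == "critical")),
         ("warning",  w ++ l.filter (fun f => pvSev f == "warning")),
         ("info",     i ++ l.filter (fun f => pvSev f != "critical" && pvSev f != "warning"))] := by
  have e1 : ("warning" : String) = "critical" ↔ False := by simp
  have e2 : ("info" : String) = "critical" ↔ False := by simp
  have e3 : ("critical" : String) = "warning" ↔ False := by simp
  have e4 : ("info" : String) = "warning" ↔ False := by simp
  have e5 : ("critical" : String) = "info" ↔ False := by simp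
  have e6 : ("warning" : String) = "info" ↔ False := by simp
  induction l generalizing c w i with
  | nil => simp
  | cons f l ih =>
    rw [List.foldl_cons]
    by_cases hc : pvSev f = "critical"
    · have h : pvStepA (PySem.Dict.mk [("critical", c), ("warning", w), ("info", i)]) f
          = PySem.Dict.mk [("critical", c ++ [f]), ("warning", w), ("info", i)] := by
        norm_num [pvStepA, hc, PySem.Dict.contains, PySem.Dict.modify, PySem.Dict.get?,
          PySem.Dict.insert, PySem.Dict.getD, e1, e2]
      rw [h, ih]
      simp [hc]
    · by_cases hw : pvSev f = "warning"
      · have h : pvStepA (PySem.Dict.mk [("critical", c), ("warning", w), ("info", i)]) f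
            = PySem.Dict.mk [("critical", c), ("warning", w ++ [f]), ("info", i)] := by
          norm_num [pvStepA, hw, PySem.Dict.contains, PySem.Dict.modify, PySem.Dict.get?,
            PySem.Dict.insert, PySem.Dict.getD, e3, e4]
        rw [h, ih]
        simp [hw]
      · have h : pvStepA (PySem.Dict.mk [("critical", c), ("warning", w), ("info", i)]) f
            = PySem.Dict.mk [("critical", c), ("warning", w), ("info", i ++ [f])] := by
          by_cases hi : pvSev f = "info"
          · norm_num [pvStepA, hi, PySem.Dict.contains, PySem.Dict.modify, PySem.Dict.get?,
              PySem.Dict.insert, PySem.Dict.getD, e5, e6]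
          · norm_num [pvStepA, hc, hw, hi, Ne.symm hc, Ne.symm hw, Ne.symm hi,
              PySem.Dict.contains, PySem.Dict.modify, PySem.Dict.get?,
              PySem.Dict.insert, PySem.Dict.getD, e5, e6]
        rw [h, ih]
        simp [hc, hw]

-- ===== VERDICT (by name: the statement is the Claim_ definition above) =====
theorem rank_findings_py_spec : Claim_equal_rank_findings_py := by
  intro findings _
  show rank_findings_py findings = rank_findings_py_alt findings
  unfold rank_findings_py rank_findings_py_alt
  rw [show PySem.Dict.ofList [("critical", ([] : List (List (String × String)))), ("warning", []), ("info", [])]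
      = PySem.Dict.mk [("critical", []), ("warning", []), ("info", [])] from rfl]
  rw [rank_loop_invariant]
  simp
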